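-- pv_equiv track=rewrite | github.com/Dev-Muzzamil/test-polylandid-code-switching | src/language_detector.py | _align_tokens_with_ground_truth
-- ===== SOURCE A (Python) =====
-- from typing import List, Dict, Tuple, Optional
--
-- def _align_tokens_with_ground_truth(tokens: List[str], gt_spans: List[Dict], gt_text: str) -> List[str]:
--     """Align prediction tokens with ground truth spans."""
--     # Simple approach: reconstruct text and find character positions
--     reconstructed_text = ' '.join(tokens)
--
--     # Create character-to-language mapping for ground truth
--     char_to_lang = {}
--     char_offset = 0
--
--     for span in gt_spans:
--         span_text = span['text']
--         span_lang = span['lang']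
--
--         # Find span in ground truth text
--         span_start = gt_text.find(span_text, char_offset)
--         if span_start != -1:
--             for i in range(len(span_text)):
--                 char_to_lang[span_start + i] = span_lang
--             char_offset = span_start + len(span_text)
--
--     # Map tokens to languages
--     token_labels = []
--     char_pos = 0
--
--     for token in tokens:
--         # Find most common language in token span
--         token_langs = []
--         for i in range(len(token)):
--             if char_pos + i in char_to_lang:
--                 token_langs.append(char_to_lang[char_pos + i])
--
--         if token_langs:
--             # Use most frequent language
--             from collections import Counter
--             lang_counts = Counter(token_langs)
--             best_lang = lang_counts.most_common(1)[0][0]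
--             token_labels.append(best_lang)
--         else:
--             token_labels.append('en')  # Default
--
--         char_pos += len(token) + 1  # +1 for space
--
--     return token_labels
-- ===== SOURCE B (Python) =====
-- def _align_tokens_with_ground_truth(tokens, gt_spans, gt_text):
--     # Phase 1: one sorted list of disjoint character intervals (start, end, lang),
--     # built by the same sequential find() matching as the original.
--     intervals = []
--     char_offset = 0
--     for span in gt_spans:
--         span_text = span['text']
--         span_lang = span['lang']
--         start = gt_text.find(span_text, char_offset)
--         if start != -1:
--             end = start + len(span_text)
--             intervals.append((start, end, span_lang))
--             char_offset = end
--     # Phase 2: per token, accumulate overlap lengths per language (insertion-ordered),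
--     # then take the first language with the strictly largest overlap ('en' if none).
--     labels = []
--     char_pos = 0
--     for token in tokens:
--         token_end = char_pos + len(token)
--         counts = {}
--         for start, end, lang in intervals:
--             overlap = min(end, token_end) - max(start, char_pos)
--             if overlap > 0:
--                 counts[lang] = counts.get(lang, 0) + overlap
--         best_lang, best_count = 'en', 0
--         for lang, cnt in counts.items():
--             if cnt > best_count:
--                 best_lang, best_count = lang, cnt
--         labels.append(best_lang)
--         char_pos += len(token) + 1
--     return labels
-- ===== Notes on version B (the rewrite author's own statement) =====
-- stated objective: alternative
-- what changed: Replaces A's per-character position->language dict and per-character token scan (plus Counter.most_common stable sort) with a sorted list of disjoint (start,end,lang) intervals and a per-token overlap-length count, picking the first language with the strictly largest overlap.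
import Mathlib
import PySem

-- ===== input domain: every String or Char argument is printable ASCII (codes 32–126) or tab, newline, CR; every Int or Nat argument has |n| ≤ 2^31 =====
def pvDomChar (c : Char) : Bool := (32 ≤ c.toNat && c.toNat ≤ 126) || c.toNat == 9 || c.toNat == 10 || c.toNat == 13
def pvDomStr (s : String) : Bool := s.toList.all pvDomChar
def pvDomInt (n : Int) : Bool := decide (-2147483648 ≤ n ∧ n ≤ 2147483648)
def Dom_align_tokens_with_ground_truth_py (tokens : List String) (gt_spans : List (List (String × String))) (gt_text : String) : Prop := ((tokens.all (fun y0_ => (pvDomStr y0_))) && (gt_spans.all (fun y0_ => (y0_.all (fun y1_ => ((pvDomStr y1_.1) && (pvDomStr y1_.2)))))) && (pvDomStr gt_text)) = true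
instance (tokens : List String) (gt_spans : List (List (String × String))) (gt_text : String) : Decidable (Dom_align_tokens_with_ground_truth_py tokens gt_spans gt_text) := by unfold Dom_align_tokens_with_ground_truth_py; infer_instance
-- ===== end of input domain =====

-- B replaces A's per-character dict with a sorted list of disjoint (start, end, lang)
-- intervals and a per-token overlap count (objective: alternative decomposition, same cost).

-- ===== PORT A =====
-- literal transliteration of _align_tokens_with_ground_truth
def align_tokens_with_ground_truth_py (tokens : List String) (gt_spans : List (List (String × String))) (gt_text : String) : List String :=
  let _reconstructed_text := PySem.Str.join " " tokens
  let phase1 := gt_spans.foldl (fun (st : PySem.Dict Int String × Int) span =>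
      let span_text := (PySem.Dict.ofList span).getD "text" ""   -- span['text']; Pre_ guarantees the key
      let span_lang := (PySem.Dict.ofList span).getD "lang" ""   -- span['lang']; Pre_ guarantees the key
      let span_start := PySem.Str.findFrom gt_text span_text st.2 none
      if span_start ≠ -1 then
        ((PySem.List.pyRange 0 (PySem.Str.len span_text) 1).foldl
            (fun d i => d.insert (span_start + i) span_lang) st.1,
         span_start + PySem.Str.len span_text)
      else st) (PySem.Dict.empty, 0)
  let char_to_lang := phase1.1
  (tokens.foldl (fun (st : List String × Int) token =>
      let token_langs := (PySem.List.pyRange 0 (PySem.Str.len token) 1).foldl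
          (fun acc i => if char_to_lang.contains (st.2 + i) then acc ++ [char_to_lang.getD (st.2 + i) ""] else acc)
          ([] : List String)
      let labels :=
        if token_langs ≠ [] then
          let lang_counts := PySem.Dict.counter token_langs
          -- most_common(1)[0][0]: first item of the count-descending stable sort (list is nonempty here)
          let best_lang := (PySem.List.pyGetD (PySem.List.sorted lang_counts.items (fun p => p.2) true) 0 ("", 0)).1
          st.1 ++ [best_lang]
        else st.1 ++ ["en"]
      (labels, st.2 + PySem.Str.len token + 1)) (([] : List String), 0)).1

-- ===== PORT B =====
-- literal transliteration of Source B
def align_tokens_with_ground_truth_py_alt (tokens : List String) (gt_spans : List (List (String × String))) (gt_text : String) : List String :=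
  let intervals := (gt_spans.foldl (fun (st : List (Int × Int × String) × Int) span =>
      let span_text := (PySem.Dict.ofList span).getD "text" ""
      let span_lang := (PySem.Dict.ofList span).getD "lang" ""
      let start := PySem.Str.findFrom gt_text span_text st.2 none
      if start ≠ -1 then
        (st.1 ++ [(start, start + PySem.Str.len span_text, span_lang)], start + PySem.Str.len span_text)
      else st) (([] : List (Int × Int × String)), 0)).1
  (tokens.foldl (fun (st : List String × Int) token =>
      let token_end := st.2 + PySem.Str.len token
      let counts := intervals.foldl (fun (d : PySem.Dict String Int) iv =>
          let overlap := min iv.2.1 token_end - max iv.1 st.2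
          if overlap > 0 then d.insert iv.2.2 (d.getD iv.2.2 0 + overlap) else d) PySem.Dict.empty
      let best := counts.items.foldl (fun (b : String × Int) kv => if kv.2 > b.2 then kv else b) ("en", 0)
      (st.1 ++ [best.1], st.2 + PySem.Str.len token + 1)) (([] : List String), 0)).1

-- ===== PRECONDITION & SPEC =====
-- Pre_ excludes only spans missing a 'text' or 'lang' key, on which A raises KeyError.
def Pre_align_tokens_with_ground_truth_py (tokens : List String) (gt_spans : List (List (String × String))) (gt_text : String) : Prop :=
  ∀ span ∈ gt_spans, "text" ∈ span.map Prod.fst ∧ "lang" ∈ span.map Prod.fst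
instance (tokens : List String) (gt_spans : List (List (String × String))) (gt_text : String) : Decidable (Pre_align_tokens_with_ground_truth_py tokens gt_spans gt_text) := by unfold Pre_align_tokens_with_ground_truth_py; infer_instance

def pvWitness_align_tokens_with_ground_truth_py : List String × (List (List (String × String))) × String :=
  (["ab", "cd"], [[("text", "ab"), ("lang", "hi")]], "ab cd")

def Spec_align_tokens_with_ground_truth_py (tokens : List String) (gt_spans : List (List (String × String))) (gt_text : String) (out : List String) : Prop := out = align_tokens_with_ground_truth_py_alt tokens gt_spans gt_text
instance (tokens : List String) (gt_spans : List (List (String × String))) (gt_text : String) (out : List String) : Decidable (Spec_align_tokens_with_ground_truth_py tokens gt_spans gt_text out) := by unfold Spec_align_tokens_with_ground_truth_py; infer_instance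

-- ===== CLAIM (what is proved, stated in full; the proofs are below) =====
def Claim_equal_align_tokens_with_ground_truth_py : Prop := ∀ (tokens : List String) (gt_spans : List (List (String × String))) (gt_text : String), Dom_align_tokens_with_ground_truth_py tokens gt_spans gt_text → Pre_align_tokens_with_ground_truth_py tokens gt_spans gt_text → Spec_align_tokens_with_ground_truth_py tokens gt_spans gt_text (align_tokens_with_ground_truth_py tokens gt_spans gt_text)


-- ===== LEMMAS AND PROOFS =====

theorem pvRange_shift (r n : Int) :
    (PySem.List.pyRange 0 n 1).map (fun i => r + i) = PySem.List.pyRange r (r + n) 1 := by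
  simp [PySem.List.pyRange_one, List.map_map, Function.comp]

def pvFlat (ivs : List (Int × Int × String)) : List (Int × String) :=
  ivs.flatMap (fun iv => (PySem.List.pyRange iv.1 iv.2.1 1).map (fun i => (i, iv.2.2)))

theorem pvMem_flat {ivs : List (Int × Int × String)} {q : Int} {l : String} :
    (q, l) ∈ pvFlat ivs ↔ ∃ iv ∈ ivs, iv.1 ≤ q ∧ q < iv.2.1 ∧ iv.2.2 = l := by
  simp [pvFlat, List.mem_flatMap, PySem.List.mem_pyRange_one]

theorem pvFlat_keys_nodup (ivs : List (Int × Int × String))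
    (hp : ivs.Pairwise (fun a b => a.2.1 ≤ b.1)) :
    ((pvFlat ivs).map Prod.fst).Nodup := by
  have : (pvFlat ivs).map Prod.fst = ivs.flatMap (fun iv => PySem.List.pyRange iv.1 iv.2.1 1) := by
    simp [pvFlat, List.map_flatMap, List.map_map, Function.comp_def]
  rw [this, List.nodup_flatMap]
  refine ⟨fun iv _ => PySem.List.nodup_pyRange_one _ _, ?_⟩
  refine hp.imp ?_
  intro a b hab x hxa hxb
  rw [PySem.List.mem_pyRange_one] at hxa hxb
  omega

theorem pvReplFold (d : PySem.Dict String Int) (l : String) :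
    ∀ (n : Nat), 0 < n →
    (List.replicate n l).foldl (fun d x => d.modify x 0 (· + 1)) d
      = d.insert l (d.getD l 0 + (n : Int)) := by
  intro n
  induction n with
  | zero => omega
  | succ k ih =>
    intro _
    rcases Nat.eq_zero_or_pos k with hk | hk
    · subst hk
      simp [PySem.Dict.modify]
    · rw [List.replicate_succ', List.foldl_append, ih hk]
      simp [PySem.Dict.modify, PySem.Dict.insert_insert_self, PySem.Dict.getD_insert_self,
        Nat.cast_succ, add_assoc]

theorem pvHeadInsertBy (key : (String × Int) → Int) :
    ∀ (l : List (String × Int)) (h : String × Int) (t : List (String × Int)),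
    ∃ t', l.foldl (fun acc x => PySem.List.insertBy (fun a b => decide (key b < key a)) x acc) (h :: t)
      = (l.foldl (fun b x => if key b < key x then x else b) h) :: t' := by
  intro l
  induction l with
  | nil => exact fun h t => ⟨t, rfl⟩
  | cons x xs ih =>
    intro h t
    simp only [List.foldl_cons, PySem.List.insertBy]
    by_cases hc : key h < key x
    · simpa [hc] using ih x (h :: t)
    · simpa [hc] using ih h (PySem.List.insertBy (fun a b => decide (key b < key a)) x t)

theorem pvCounts (ivs : List (Int × Int × String)) (p te : Int) :
    PySem.Dict.counter (ivs.flatMap (fun iv => List.replicate (min iv.2.1 te - max iv.1 p).toNat iv.2.2))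
      = ivs.foldl (fun d iv =>
          if min iv.2.1 te - max iv.1 p > 0 then
            d.insert iv.2.2 (d.getD iv.2.2 0 + (min iv.2.1 te - max iv.1 p))
          else d) PySem.Dict.empty := by
  rw [PySem.Dict.counter_eq_foldl, List.foldl_flatMap]
  refine PySem.List.foldl_congr_mem _ _ _ _ ?_
  intro acc iv _
  by_cases hov : min iv.2.1 te - max iv.1 p > 0
  · rw [pvReplFold acc iv.2.2 _ (by omega), if_pos hov, Int.toNat_of_nonneg hov.le]
  · have h0 : (min iv.2.1 te - max iv.1 p).toNat = 0 := by omega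
    rw [h0, if_neg hov]
    rfl

theorem pvBest (tl : List String) :
    (if tl ≠ [] then
        (PySem.List.pyGetD (PySem.List.sorted (PySem.Dict.counter tl).items (fun p => p.2) true) 0 ("", 0)).1
      else "en")
    = ((PySem.Dict.counter tl).items.foldl (fun (b : String × Int) kv => if kv.2 > b.2 then kv else b) ("en", 0)).1 := by
  rcases tl with _ | ⟨x, rest⟩
  · simp [PySem.Dict.counter, PySem.Dict.empty]
  · have hitems := PySem.Dict.items_counter (x :: rest)
    rw [PySem.Set.ofList_cons] at hitems
    set tli := ((PySem.Set.ofList rest).discard x).map (fun k => (k, (List.count k (x :: rest) : Int))) with htli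
    have hx : (PySem.Dict.counter (x :: rest)).items = (x, (List.count x (x :: rest) : Int)) :: tli := by
      simpa using hitems
    simp only [ne_eq, reduceCtorEq, not_false_iff, if_pos, hx]
    -- sorted side
    rw [PySem.List.sorted_rev_eq_foldl_insertBy]
    simp only [List.foldl_cons]
    have hins : PySem.List.insertBy (fun a b => decide ((fun p : String × Int => p.2) b < (fun p : String × Int => p.2) a)) (x, (List.count x (x :: rest) : Int)) [] = [(x, (List.count x (x :: rest) : Int))] := by
      simp [PySem.List.insertBy]
    rw [hins]
    obtain ⟨t', ht'⟩ := pvHeadInsertBy (fun p => p.2) tli (x, (List.count x (x :: rest) : Int)) []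
    rw [ht', PySem.List.pyGetD_zero_cons]
    -- scan side
    have hcount : (0 : Int) < (List.count x (x :: rest) : Int) := by
      have h1 : 0 < List.count x (x :: rest) := List.count_pos_iff.mpr (by simp)
      exact_mod_cast h1
    simp only [gt_iff_lt]
    rw [if_pos hcount]

theorem pvLangs (d : PySem.Dict Int String) (ivs : List (Int × Int × String))
    (hitems : d.items = pvFlat ivs) (hp : ivs.Pairwise (fun a b => a.2.1 ≤ b.1)) (p : Int) :
    ∀ (m : Nat),
    (PySem.List.pyRange 0 (m : Int) 1).foldl
        (fun acc i => if d.contains (p + i) then acc ++ [d.getD (p + i) ""] else acc) []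
      = ivs.flatMap (fun iv => List.replicate (min iv.2.1 (p + m) - max iv.1 p).toNat iv.2.2) := by
  intro m
  induction m with
  | zero =>
    rw [PySem.List.pyRange_one_eq_nil (by norm_num)]
    simp only [List.foldl_nil]
    symm
    rw [List.flatMap_eq_nil_iff]
    intro iv _
    have : (min iv.2.1 (p + (0 : Nat)) - max iv.1 p).toNat = 0 := by
      simp only [Nat.cast_zero, add_zero]
      omega
    rw [this, List.replicate_zero]
  | succ m ih =>
    have hcast : ((m + 1 : Nat) : Int) = (m : Int) + 1 := by push_cast; ring
    rw [hcast, PySem.List.pyRange_one_succ_right (by positivity), List.foldl_append]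
    rw [ih]
    set q : Int := p + (m : Int) with hq
    simp only [List.foldl_cons, List.foldl_nil, ← add_assoc]
    by_cases hc : d.contains (p + (m : Int)) = true
    · -- some interval contains q
      have hmemk : (p + (m : Int)) ∈ d.keys := (PySem.Dict.contains_iff_mem_keys d _).mp hc
      obtain ⟨pair, hpmem, hfst⟩ := List.mem_map.mp hmemk
      have hpair : pair = (q, pair.2) := Prod.ext (hfst.trans hq.symm) rfl
      have hmemflat : (q, pair.2) ∈ pvFlat ivs := by
        rw [← hitems]; rw [hpair] at hpmem; exact hpmem
      obtain ⟨iv, hivmem, hsle, hlt, hlang⟩ := pvMem_flat.mp hmemflat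
      have hnd : d.keys.Nodup := by
        show (d.items.map (fun x => x.1)).Nodup
        rw [hitems]; exact pvFlat_keys_nodup ivs hp
      have hgetD : d.getD q "" = pair.2 := by
        refine PySem.Dict.getD_of_mem_items d ?_ hnd ""
        rw [hpair] at hpmem; exact hpmem
      obtain ⟨l1, l2, rfl⟩ := List.append_of_mem hivmem
      have hpa := (List.pairwise_append.mp hp)
      have hl1 : ∀ a ∈ l1, a.2.1 ≤ iv.1 := by
        intro a ha
        exact hpa.2.2 a ha iv (List.mem_cons_self)
      have hl2 : ∀ b ∈ l2, iv.2.1 ≤ b.1 := by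
        intro b hb
        exact (List.pairwise_cons.mp hpa.2.1).1 b hb
      rw [if_pos hc]
      have hpq : p ≤ q := by omega
      simp only [List.flatMap_append, List.flatMap_cons]
      have e1 : ∀ a ∈ l1,
          List.replicate (min a.2.1 (q + 1) - max a.1 p).toNat a.2.2
            = List.replicate (min a.2.1 q - max a.1 p).toNat a.2.2 := by
        intro a ha
        have := hl1 a ha
        congr 1
        omega
      have e2 : (min iv.2.1 (q + 1) - max iv.1 p).toNat
          = (min iv.2.1 q - max iv.1 p).toNat + 1 := by omega
      have e3nil : ∀ (r : Int), r ≤ q + 1 → l2.flatMap (fun b => List.replicate (min b.2.1 r - max b.1 p).toNat b.2.2) = [] := by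
        intro r hr
        rw [List.flatMap_eq_nil_iff]
        intro b hb
        have := hl2 b hb
        have : (min b.2.1 r - max b.1 p).toNat = 0 := by omega
        rw [this, List.replicate_zero]
      rw [List.flatMap_congr e1, e2, List.replicate_succ']
      rw [e3nil (q + 1) (le_refl _), e3nil q (by omega)]
      rw [hgetD, hpair]
      simp [hlang]
    · rw [if_neg hc]
      have hnone : ∀ iv ∈ ivs, ¬(iv.1 ≤ q ∧ q < iv.2.1) := by
        intro iv hivmem hcontra
        have : (q, iv.2.2) ∈ pvFlat ivs :=
          pvMem_flat.mpr ⟨iv, hivmem, hcontra.1, hcontra.2, rfl⟩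
        rw [← hitems] at this
        have : q ∈ d.keys := List.mem_map.mpr ⟨(q, iv.2.2), this, rfl⟩
        exact hc ((PySem.Dict.contains_iff_mem_keys d _).mpr this)
      refine (List.flatMap_congr ?_).symm
      intro iv hivmem
      have := hnone iv hivmem
      congr 1
      omega

def pvInv (n : Int) (ivs : List (Int × Int × String)) (off : Int) : Prop :=
  0 ≤ off ∧ off ≤ n ∧ (∀ iv ∈ ivs, iv.1 ≤ iv.2.1 ∧ iv.2.1 ≤ off) ∧
    ivs.Pairwise (fun a b => a.2.1 ≤ b.1)

theorem pvFlat_append (ivs jvs : List (Int × Int × String)) :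
    pvFlat (ivs ++ jvs) = pvFlat ivs ++ pvFlat jvs := by
  simp [pvFlat]

theorem pvStep (T t l : String) (d : PySem.Dict Int String) (ivs : List (Int × Int × String))
    (off : Int) (hd : d.items = pvFlat ivs) (hinv : pvInv (T.toList.length : Int) ivs off)
    (hne : PySem.Str.findFrom T t off none ≠ -1) :
    (((PySem.List.pyRange 0 (PySem.Str.len t) 1).foldl
        (fun d i => d.insert (PySem.Str.findFrom T t off none + i) l) d).items
      = pvFlat (ivs ++ [(PySem.Str.findFrom T t off none,
          PySem.Str.findFrom T t off none + PySem.Str.len t, l)]))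
    ∧ pvInv (T.toList.length : Int)
        (ivs ++ [(PySem.Str.findFrom T t off none,
          PySem.Str.findFrom T t off none + PySem.Str.len t, l)])
        (PySem.Str.findFrom T t off none + PySem.Str.len t) := by
  obtain ⟨h0, hlen, hb, hp⟩ := hinv
  simp only [PySem.Str.len_eq, PySem.Str.findFrom_eq] at hne ⊢
  have hkle : off.toNat ≤ T.toList.length := by omega
  have hspec := PySem.Chars.findFrom_natCast_spec T.toList t.toList off.toNat hkle
  rw [Int.toNat_of_nonneg h0] at hspec
  obtain ⟨hoffr, hpre, -⟩ := hspec hne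
  have hr0 : (0 : Int) ≤ PySem.Chars.findFrom T.toList t.toList off := le_trans h0 hoffr
  have hrlen : PySem.Chars.findFrom T.toList t.toList off + (t.toList.length : Int)
      ≤ (T.toList.length : Int) := by
    have h1 := hpre.length_le
    rw [List.length_drop] at h1
    have h2 := PySem.Chars.findFrom_natCast T.toList t.toList off.toNat hkle
    rw [Int.toNat_of_nonneg h0] at h2
    have hfle : PySem.Chars.findFrom T.toList t.toList off ≤ (T.toList.length : Int) := by
      rw [h2]
      split_ifs with h3
      · omega
      · have h4 := PySem.Chars.find_le_length (T.toList.drop off.toNat) t.toList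
        rw [List.length_drop] at h4
        omega
    omega
  have hfresh : ∀ i ∈ PySem.List.pyRange 0 (t.toList.length : Int) 1,
      d.contains (PySem.Chars.findFrom T.toList t.toList off + i) = false := by
    intro i hi
    rw [PySem.List.mem_pyRange_one] at hi
    rw [Bool.eq_false_iff]
    intro hcont
    obtain ⟨pair, hpmem, hfst⟩ := List.mem_map.mp ((PySem.Dict.contains_iff_mem_keys d _).mp hcont)
    have hmem : (PySem.Chars.findFrom T.toList t.toList off + i, pair.2) ∈ pvFlat ivs := by
      rw [← hd]
      rwa [show pair = (PySem.Chars.findFrom T.toList t.toList off + i, pair.2) from Prod.ext hfst rfl] at hpmem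
    obtain ⟨iv, hivmem, _, hlt, _⟩ := pvMem_flat.mp hmem
    have := (hb iv hivmem).2
    omega
  have hnodup : ((PySem.List.pyRange 0 (t.toList.length : Int) 1).map
      (fun i => PySem.Chars.findFrom T.toList t.toList off + i)).Nodup := by
    rw [pvRange_shift]
    exact PySem.List.nodup_pyRange_one _ _
  refine ⟨?_, ?_⟩
  · rw [PySem.Dict.items_foldl_insert_fresh _ _ _ d hfresh hnodup, hd, pvFlat_append]
    congr 1
    simp only [pvFlat, List.flatMap_cons, List.flatMap_nil, List.append_nil]
    rw [← pvRange_shift, List.map_map]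
    rfl
  · refine ⟨by omega, by omega, ?_, ?_⟩
    · intro iv hiv
      rcases List.mem_append.mp hiv with h | h
      · have := hb iv h
        exact ⟨this.1, by omega⟩
      · simp only [List.mem_singleton] at h
        subst h
        refine ⟨?_, ?_⟩ <;> simp
    · rw [List.pairwise_append]
      refine ⟨hp, List.pairwise_singleton _ _, ?_⟩
      intro a ha b hb'
      simp only [List.mem_singleton] at hb'
      subst hb'
      have := (hb a ha).2
      simp
      omega

theorem pvPhase1 (T : String) (spans : List (List (String × String))) :
    ∀ (d : PySem.Dict Int String) (ivs : List (Int × Int × String)) (off : Int),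
    d.items = pvFlat ivs → pvInv (T.toList.length : Int) ivs off →
    ((spans.foldl (fun (st : PySem.Dict Int String × Int) span =>
        if PySem.Str.findFrom T ((PySem.Dict.ofList span).getD "text" "") st.2 none ≠ -1 then
          ((PySem.List.pyRange 0 (PySem.Str.len ((PySem.Dict.ofList span).getD "text" "")) 1).foldl
              (fun d i => d.insert (PySem.Str.findFrom T ((PySem.Dict.ofList span).getD "text" "") st.2 none + i)
                ((PySem.Dict.ofList span).getD "lang" "")) st.1,
           PySem.Str.findFrom T ((PySem.Dict.ofList span).getD "text" "") st.2 none
             + PySem.Str.len ((PySem.Dict.ofList span).getD "text" ""))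
        else st) (d, off)).2
      = (spans.foldl (fun (st : List (Int × Int × String) × Int) span =>
        if PySem.Str.findFrom T ((PySem.Dict.ofList span).getD "text" "") st.2 none ≠ -1 then
          (st.1 ++ [(PySem.Str.findFrom T ((PySem.Dict.ofList span).getD "text" "") st.2 none,
             PySem.Str.findFrom T ((PySem.Dict.ofList span).getD "text" "") st.2 none
               + PySem.Str.len ((PySem.Dict.ofList span).getD "text" ""),
             (PySem.Dict.ofList span).getD "lang" "")],
           PySem.Str.findFrom T ((PySem.Dict.ofList span).getD "text" "") st.2 none
             + PySem.Str.len ((PySem.Dict.ofList span).getD "text" ""))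
        else st) (ivs, off)).2)
    ∧ ((spans.foldl (fun (st : PySem.Dict Int String × Int) span =>
        if PySem.Str.findFrom T ((PySem.Dict.ofList span).getD "text" "") st.2 none ≠ -1 then
          ((PySem.List.pyRange 0 (PySem.Str.len ((PySem.Dict.ofList span).getD "text" "")) 1).foldl
              (fun d i => d.insert (PySem.Str.findFrom T ((PySem.Dict.ofList span).getD "text" "") st.2 none + i)
                ((PySem.Dict.ofList span).getD "lang" "")) st.1,
           PySem.Str.findFrom T ((PySem.Dict.ofList span).getD "text" "") st.2 none
             + PySem.Str.len ((PySem.Dict.ofList span).getD "text" ""))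
        else st) (d, off)).1.items
      = pvFlat (spans.foldl (fun (st : List (Int × Int × String) × Int) span =>
        if PySem.Str.findFrom T ((PySem.Dict.ofList span).getD "text" "") st.2 none ≠ -1 then
          (st.1 ++ [(PySem.Str.findFrom T ((PySem.Dict.ofList span).getD "text" "") st.2 none,
             PySem.Str.findFrom T ((PySem.Dict.ofList span).getD "text" "") st.2 none
               + PySem.Str.len ((PySem.Dict.ofList span).getD "text" ""),
             (PySem.Dict.ofList span).getD "lang" "")],
           PySem.Str.findFrom T ((PySem.Dict.ofList span).getD "text" "") st.2 none
             + PySem.Str.len ((PySem.Dict.ofList span).getD "text" ""))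
        else st) (ivs, off)).1)
    ∧ pvInv (T.toList.length : Int)
        ((spans.foldl (fun (st : List (Int × Int × String) × Int) span =>
        if PySem.Str.findFrom T ((PySem.Dict.ofList span).getD "text" "") st.2 none ≠ -1 then
          (st.1 ++ [(PySem.Str.findFrom T ((PySem.Dict.ofList span).getD "text" "") st.2 none,
             PySem.Str.findFrom T ((PySem.Dict.ofList span).getD "text" "") st.2 none
               + PySem.Str.len ((PySem.Dict.ofList span).getD "text" ""),
             (PySem.Dict.ofList span).getD "lang" "")],
           PySem.Str.findFrom T ((PySem.Dict.ofList span).getD "text" "") st.2 none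
             + PySem.Str.len ((PySem.Dict.ofList span).getD "text" ""))
        else st) (ivs, off)).1)
        ((spans.foldl (fun (st : List (Int × Int × String) × Int) span =>
        if PySem.Str.findFrom T ((PySem.Dict.ofList span).getD "text" "") st.2 none ≠ -1 then
          (st.1 ++ [(PySem.Str.findFrom T ((PySem.Dict.ofList span).getD "text" "") st.2 none,
             PySem.Str.findFrom T ((PySem.Dict.ofList span).getD "text" "") st.2 none
               + PySem.Str.len ((PySem.Dict.ofList span).getD "text" ""),
             (PySem.Dict.ofList span).getD "lang" "")],
           PySem.Str.findFrom T ((PySem.Dict.ofList span).getD "text" "") st.2 none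
             + PySem.Str.len ((PySem.Dict.ofList span).getD "text" ""))
        else st) (ivs, off)).2) := by
  induction spans with
  | nil => exact fun d ivs off hd hinv => ⟨rfl, hd, hinv⟩
  | cons span rest ih =>
    intro d ivs off hd hinv
    simp only [List.foldl_cons]
    by_cases hc : PySem.Str.findFrom T ((PySem.Dict.ofList span).getD "text" "") (d, off).2 none ≠ -1
    · obtain ⟨hitems', hinv'⟩ := pvStep T ((PySem.Dict.ofList span).getD "text" "")
        ((PySem.Dict.ofList span).getD "lang" "") d ivs off hd hinv hc
      rw [if_pos hc, if_pos hc]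
      exact ih _ _ _ hitems' hinv'
    · rw [if_neg hc, if_neg hc]
      exact ih d ivs off hd hinv

theorem pvToken (d : PySem.Dict Int String) (ivs : List (Int × Int × String))
    (hitems : d.items = pvFlat ivs) (hp : ivs.Pairwise (fun a b => a.2.1 ≤ b.1))
    (p : Int) (token : String) :
    (if ((PySem.List.pyRange 0 (PySem.Str.len token) 1).foldl
          (fun acc i => if d.contains (p + i) then acc ++ [d.getD (p + i) ""] else acc) []) ≠ [] then
        (PySem.List.pyGetD (PySem.List.sorted
          (PySem.Dict.counter ((PySem.List.pyRange 0 (PySem.Str.len token) 1).foldl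
            (fun acc i => if d.contains (p + i) then acc ++ [d.getD (p + i) ""] else acc) [])).items
          (fun p => p.2) true) 0 ("", 0)).1
      else "en")
    = ((ivs.foldl (fun (dc : PySem.Dict String Int) iv =>
          if min iv.2.1 (p + PySem.Str.len token) - max iv.1 p > 0 then
            dc.insert iv.2.2 (dc.getD iv.2.2 0 + (min iv.2.1 (p + PySem.Str.len token) - max iv.1 p))
          else dc) PySem.Dict.empty).items.foldl
        (fun (b : String × Int) kv => if kv.2 > b.2 then kv else b) ("en", 0)).1 := by
  have hlangs := pvLangs d ivs hitems hp p token.toList.length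
  simp only [PySem.Str.len_eq]
  rw [hlangs, pvBest, pvCounts]

-- ===== VERDICT (by name: the statement is the Claim_ definition above) =====
theorem align_tokens_with_ground_truth_py_spec : Claim_equal_align_tokens_with_ground_truth_py := by
  intro tokens gt_spans gt_text _hdom _hpre
  unfold Spec_align_tokens_with_ground_truth_py
  simp only [align_tokens_with_ground_truth_py, align_tokens_with_ground_truth_py_alt]
  obtain ⟨-, hitems, hinv⟩ := pvPhase1 gt_text gt_spans PySem.Dict.empty [] 0 rfl
    ⟨le_refl 0, by positivity, by simp, List.Pairwise.nil⟩
  congr 1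
  congr 1
  funext st token
  simp only [Prod.mk.injEq, and_true]
  rw [← apply_ite (fun x : String => st.1 ++ [x])]
  rw [pvToken _ _ hitems hinv.2.2.2 st.2 token]
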